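-- pv_equiv track=rewrite | github.com/chrisjsewell/ipypublish | ipypublish/filters/filters.py | is_equation
-- ===== SOURCE A (Python) =====
-- def is_equation(text):
--     """test if a piece of text is a latex equation, by how it is wrapped"""
--     text = text.strip()
--
--     if any([text.startswith('\\begin{{{0}}}'.format(env))
--             and text.endswith('\\end{{{0}}}'.format(env))
--             for env in
--             ['equation', 'split', 'equation*', 'align', 'align*',
--              'multline', 'multline*', 'gather', 'gather*']]):
--         return True
--     elif text.startswith('$') and text.endswith('$'):
--         return True
--     else:
--         return False
-- ===== SOURCE B (Python) =====
-- _ENVS = frozenset({'equation', 'split', 'equation*', 'align', 'align*',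
--                    'multline', 'multline*', 'gather', 'gather*'})
--
--
-- def is_equation(text):
--     """test if a piece of text is a latex equation, by how it is wrapped"""
--     text = text.strip()
--     if text.startswith('\\begin{'):
--         # parse the environment name once instead of testing each env
--         name, sep, _ = text[7:].partition('}')
--         if sep and name in _ENVS and text.endswith('\\end{' + name + '}'):
--             return True
--     return text.startswith('$') and text.endswith('$')
-- ===== Notes on version B (the rewrite author's own statement) =====
-- stated objective: alternative
-- what changed: Instead of scanning the nine environments and testing each one's begin/end prefix-suffix pair against the stripped text, B parses the leading environment name once (partitioning the text after the 7-character begin prefix at the first closing brace), checks the name by frozenset membership, and tests the single matching end marker as suffix; the dollar fallback is unchanged.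
import Mathlib
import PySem

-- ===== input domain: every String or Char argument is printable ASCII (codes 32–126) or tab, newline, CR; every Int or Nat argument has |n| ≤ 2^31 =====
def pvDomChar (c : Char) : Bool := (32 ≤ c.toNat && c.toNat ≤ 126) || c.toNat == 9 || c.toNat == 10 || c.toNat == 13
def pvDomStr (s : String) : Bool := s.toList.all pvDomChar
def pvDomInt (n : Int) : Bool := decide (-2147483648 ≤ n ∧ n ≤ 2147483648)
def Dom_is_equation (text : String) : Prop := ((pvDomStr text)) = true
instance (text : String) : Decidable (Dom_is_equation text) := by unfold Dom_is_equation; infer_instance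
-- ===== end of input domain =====

-- B strips the text, parses the leading '\begin{...}' environment name once (partition at the first
-- '}') and checks it by set membership, instead of A's scan testing each of the nine environments'
-- prefix/suffix pair in turn (objective: alternative/simpler; same observable behaviour).

-- ===== PORT A =====
-- literal port of A: strip; list comprehension of per-env checks; any; then the dollar test.
-- '\\begin{{{0}}}'.format(env) is '\begin{' + env + '}' (ported as list-of-char append, exact on ASCII).
def is_equation (text : String) : Bool :=
  let t : List Char := (PySem.Str.strip text).toList
  let checks : List Bool :=
    ["equation", "split", "equation*", "align", "align*",
     "multline", "multline*", "gather", "gather*"].map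
      (fun env =>
        PySem.Chars.startswith t ("\\begin{".toList ++ env.toList ++ "}".toList) &&
        PySem.Chars.endswith t ("\\end{".toList ++ env.toList ++ "}".toList))
  if checks.any id then true
  else if PySem.Chars.startswith t "$".toList && PySem.Chars.endswith t "$".toList then true
  else false

-- ===== PORT B =====
-- the frozenset _ENVS of environment names (distinct literals)
def pvEnvs : List (List Char) :=
  ["equation".toList, "split".toList, "equation*".toList, "align".toList, "align*".toList,
   "multline".toList, "multline*".toList, "gather".toList, "gather*".toList]

-- literal port of B: strip; if it starts with '\begin{', partition text[7:] at the first '}'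
-- (name = part before, sep nonempty iff some '}' occurs) and test name by set membership.
def is_equation_alt (text : String) : Bool :=
  let t : List Char := (PySem.Str.strip text).toList
  if PySem.Chars.startswith t "\\begin{".toList then
    -- name, sep, _ = text[7:].partition('}');  'if sep' = sep nonempty
    let rest := t.drop 7
    let name := rest.takeWhile (· ≠ '}')
    let hasSep := decide (rest.dropWhile (· ≠ '}') ≠ ([] : List Char))
    if hasSep && pvEnvs.contains name &&
       PySem.Chars.endswith t ("\\end{".toList ++ name ++ "}".toList) then true
    else PySem.Chars.startswith t "$".toList && PySem.Chars.endswith t "$".toList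
  else PySem.Chars.startswith t "$".toList && PySem.Chars.endswith t "$".toList

-- ===== PRECONDITION & SPEC =====
def Spec_is_equation (text : String) (out : Bool) : Prop := out = is_equation_alt text
instance (text : String) (out : Bool) : Decidable (Spec_is_equation text out) := by unfold Spec_is_equation; infer_instance

-- ===== CLAIM (what is proved, stated in full; the proofs are below) =====
def Claim_equal_is_equation : Prop := ∀ (text : String), Dom_is_equation text → Spec_is_equation text (is_equation text)

-- ===== LEMMAS AND PROOFS =====

-- (a ++ b) is a prefix of t iff a is, and b is a prefix of the rest
theorem pv_append_prefix_iff (a b t : List Char) :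
    (a ++ b) <+: t ↔ (a <+: t ∧ b <+: t.drop a.length) := by
  induction a generalizing t with
  | nil => simp
  | cons x a ih =>
    cases t with
    | nil => simp
    | cons y t => simp [List.cons_prefix_cons, ih, and_assoc]

-- partition-at-'}' characterisation: for e without '}',
-- e ++ ['}'] is a prefix of r iff takeWhile gives exactly e and some '}' occurs.
theorem pv_partition_prefix_iff (e r : List Char) (he : '}' ∉ e) :
    (e ++ ['}']) <+: r ↔
      (r.takeWhile (· ≠ '}') = e ∧ r.dropWhile (· ≠ '}') ≠ ([] : List Char)) := by
  induction e generalizing r with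
  | nil =>
    cases r with
    | nil => simp
    | cons c r =>
      by_cases hc : c = '}'
      · simp [List.cons_prefix_cons, hc]
      · simp [List.cons_prefix_cons, hc, Ne.symm hc]
  | cons a e ih =>
    have ha : a ≠ '}' := fun h => he (h ▸ List.mem_cons_self ..)
    have he' : '}' ∉ e := fun h => he (List.mem_cons_of_mem _ h)
    cases r with
    | nil => simp
    | cons c r =>
      by_cases hc : c = '}'
      · subst hc
        simp [List.cons_prefix_cons, ha]
      · simp [List.cons_prefix_cons, hc, ih r he']
        tauto

-- single-env form: startswith('\begin{' + e + '}') on '\begin{' ++ r, read off the partition of r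
theorem pv_env_iff (r e : List Char) (he : '}' ∉ e) :
    PySem.Chars.startswith ("\\begin{".toList ++ r) ("\\begin{".toList ++ e ++ "}".toList) = true
    ↔ (r.takeWhile (· ≠ '}') = e ∧ r.dropWhile (· ≠ '}') ≠ ([] : List Char)) := by
  rw [PySem.Chars.startswith_iff, List.append_assoc, pv_append_prefix_iff]
  have hdrop : ("\\begin{".toList ++ r).drop ("\\begin{".toList).length = r :=
    List.drop_left
  rw [hdrop, show ("}".toList : List Char) = ['}'] from rfl, pv_partition_prefix_iff e r he]
  exact ⟨fun h => h.2, fun h => ⟨List.prefix_append _ _, h⟩⟩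

-- the crux: A's nine-fold any equals B's parse-once condition, on t = '\begin{' ++ r
theorem pv_crux (r : List Char) :
    ((["equation", "split", "equation*", "align", "align*",
       "multline", "multline*", "gather", "gather*"].map
        (fun env =>
          PySem.Chars.startswith ("\\begin{".toList ++ r) ("\\begin{".toList ++ env.toList ++ "}".toList) &&
          PySem.Chars.endswith ("\\begin{".toList ++ r) ("\\end{".toList ++ env.toList ++ "}".toList))).any id)
    = (decide (r.dropWhile (· ≠ '}') ≠ ([] : List Char)) &&
       pvEnvs.contains (r.takeWhile (· ≠ '}')) &&
       PySem.Chars.endswith ("\\begin{".toList ++ r)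
         ("\\end{".toList ++ r.takeWhile (· ≠ '}') ++ "}".toList)) := by
  have hbe : ∀ a b : Bool, a = b ↔ ((a = true) ↔ (b = true)) := by decide
  rw [hbe]
  rw [List.any_map, List.any_eq_true]
  constructor
  · rintro ⟨env, henv, hc⟩
    simp only [Function.comp, id_eq, Bool.and_eq_true] at hc
    obtain ⟨hs, hsuf⟩ := hc
    have he : '}' ∉ env.toList := by fin_cases henv <;> decide
    obtain ⟨hname, hsep⟩ := (pv_env_iff r env.toList he).1 hs
    rw [Bool.and_eq_true, Bool.and_eq_true, hname]
    exact ⟨⟨decide_eq_true hsep, by fin_cases henv <;> decide⟩, hsuf⟩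
  · intro h
    rw [Bool.and_eq_true, Bool.and_eq_true] at h
    obtain ⟨⟨hsep, hmem⟩, hsuf⟩ := h
    have hE : pvEnvs = (["equation", "split", "equation*", "align", "align*",
       "multline", "multline*", "gather", "gather*"].map String.toList) := rfl
    have hmem' : r.takeWhile (· ≠ '}') ∈ pvEnvs := by
      simpa using hmem
    rw [hE] at hmem'
    obtain ⟨env, henvE, htl⟩ := List.mem_map.1 hmem'
    have he : '}' ∉ env.toList := by fin_cases henvE <;> decide
    refine ⟨env, henvE, ?_⟩
    simp only [Function.comp, id_eq, Bool.and_eq_true]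
    refine ⟨(pv_env_iff r env.toList he).2 ⟨htl.symm, of_decide_eq_true hsep⟩, ?_⟩
    rw [← htl] at hsuf
    exact hsuf

-- ===== VERDICT (by name: the statement is the Claim_ definition above) =====
theorem is_equation_spec : Claim_equal_is_equation := by
  intro text _
  unfold Spec_is_equation is_equation is_equation_alt
  by_cases hp : "\\begin{".toList <+: (PySem.Str.strip text).toList
  · obtain ⟨r, hr⟩ := hp
    rw [← hr]
    have hps : PySem.Chars.startswith ("\\begin{".toList ++ r) "\\begin{".toList = true := by
      rw [PySem.Chars.startswith_iff]; exact List.prefix_append _ _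
    have hdrop : ("\\begin{".toList ++ r).drop 7 = r := by
      rw [show (7 : Nat) = ("\\begin{".toList).length from rfl]; exact List.drop_left
    simp only [hps, if_true, hdrop, pv_crux r]
    cases hC : (decide (r.dropWhile (· ≠ '}') ≠ ([] : List Char)) &&
       pvEnvs.contains (r.takeWhile (· ≠ '}')) &&
       PySem.Chars.endswith ("\\begin{".toList ++ r)
         ("\\end{".toList ++ r.takeWhile (· ≠ '}') ++ "}".toList)) with
    | true => simp
    | false =>
      simp only [Bool.false_eq_true, if_false]
      cases PySem.Chars.startswith ("\\begin{".toList ++ r) "$".toList &&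
            PySem.Chars.endswith ("\\begin{".toList ++ r) "$".toList <;> simp
  · have hps : PySem.Chars.startswith (PySem.Str.strip text).toList "\\begin{".toList = false := by
      rw [Bool.eq_false_iff]
      intro h
      exact hp ((PySem.Chars.startswith_iff _ _).1 h)
    have h9 : ∀ e : List Char,
        PySem.Chars.startswith (PySem.Str.strip text).toList ("\\begin{".toList ++ e) = false := by
      intro e
      rw [Bool.eq_false_iff]
      intro h
      exact hp ((pv_append_prefix_iff _ _ _).1 ((PySem.Chars.startswith_iff _ _).1 h)).1
    simp only [hps, List.append_assoc, h9, Bool.false_and, if_false, Bool.false_eq_true]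
    cases PySem.Chars.startswith (PySem.Str.strip text).toList "$".toList &&
          PySem.Chars.endswith (PySem.Str.strip text).toList "$".toList <;> simp
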